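-- pv_equiv track=rewrite | github.com/HPENetworking/scriptsonly | etss_ping.py | etss_range
-- ===== SOURCE A (Python) =====
-- def etss_range(etssrange):
--     hosts = []
--     block = etssrange.split('.')
--     for x, y in enumerate(block):
--         if '-' in y:
--             blockrange = y.split('-')
--             for z in range(int(blockrange[0]), int(blockrange[1])+1):
--                 ipaddr = '.'.join(block[:x] + [str(z)] + block[x+1:])
--                 hosts += etss_range(ipaddr)
--             break
--     else:
--         hosts.append(etssrange)
--     return hosts
-- ===== SOURCE B (Python) =====
-- def etss_range(etssrange):
--     # Parse each dotted block once into its candidate strings, then build the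
--     # cartesian product left-to-right (rightmost block varies fastest).
--     def expand(y):
--         if '-' in y:
--             p = y.split('-')
--             return [str(z) for z in range(int(p[0]), int(p[1]) + 1)]
--         return [y]
--     blocks = etssrange.split('.')
--     combos = expand(blocks[0])
--     for y in blocks[1:]:
--         combos = [c + '.' + o for c in combos for o in expand(y)]
--     return combos
-- ===== Notes on version B (the rewrite author's own statement) =====
-- stated objective: alternative
-- what changed: A recurses on the first dash-block, re-joining, re-splitting and re-parsing the whole string for every produced combination; B splits and parses each dotted block exactly once into its candidate list and builds the cartesian product with one left-to-right fold, producing the same hosts in the same (rightmost-varies-fastest) order.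
import Mathlib
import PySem

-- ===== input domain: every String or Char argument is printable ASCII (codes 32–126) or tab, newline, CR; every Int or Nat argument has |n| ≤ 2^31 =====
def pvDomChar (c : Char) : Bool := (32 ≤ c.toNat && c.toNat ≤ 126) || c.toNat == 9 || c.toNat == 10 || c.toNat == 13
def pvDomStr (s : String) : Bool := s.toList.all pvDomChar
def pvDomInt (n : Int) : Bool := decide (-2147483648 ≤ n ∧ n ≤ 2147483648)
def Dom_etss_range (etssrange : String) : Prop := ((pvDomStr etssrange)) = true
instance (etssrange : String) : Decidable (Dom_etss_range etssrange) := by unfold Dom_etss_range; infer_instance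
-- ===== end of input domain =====

-- B replaces A's per-host re-split/re-parse recursion by parsing each dotted block once and
-- building the cartesian product of the per-block candidate lists left to right (objective:
-- alternative algorithm, same results in the same order).

-- ===== PORT A =====
-- The `for x, y in enumerate(block): … break / else:` loop of A; `pre` is block[:x]
-- (the blocks already scanned, none containing '-'), `rest` is block[x:]; `recur` is the
-- recursive call to etss_range (fuel-indexed below; Python recursion has no fuel).
def etssALoop (recur : String → List String) (etssrange : String) :
    List String → List String → List String
  | _, [] => [etssrange]                    -- for-else: hosts.append(etssrange)
  | pre, y :: rest =>
    if PySem.Str.isIn "-" y then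
      let blockrange := (PySem.Str.split? y "-").getD []
      match PySem.Int.ofStr? (blockrange.getD 0 ""), PySem.Int.ofStr? (blockrange.getD 1 "") with
      | some lo, some hi =>
        (PySem.List.pyRange lo (hi + 1) 1).foldl
          (fun hosts z =>
            hosts ++ recur (PySem.Str.join "." (pre ++ [PySem.Int.toStr z] ++ rest))) []
      | _, _ => []                          -- int() raises ValueError here; excluded by Pre_
    else
      etssALoop recur etssrange (pre ++ [y]) rest

-- Python's recursion, made structural with a fuel parameter; each recursive call removes one
-- dash-block, so the fuel chosen in etss_range below is never exhausted on inputs in Pre_.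
def etssAFuel : Nat → String → List String
  | 0, _ => []
  | fuel + 1, s => etssALoop (etssAFuel fuel) s [] ((PySem.Str.split? s ".").getD [])

def etss_range (etssrange : String) : List String :=
  etssAFuel
    (((PySem.Str.split? etssrange ".").getD []).countP (fun y => PySem.Str.isIn "-" y) + 1)
    etssrange

-- ===== PORT B =====
-- One dotted block → its candidate strings: a '-' block becomes the decimal strings of its
-- range, any other block stays itself.
def expandBlock (y : String) : List String :=
  if PySem.Str.isIn "-" y then
    let p := (PySem.Str.split? y "-").getD []
    match PySem.Int.ofStr? (p.getD 0 ""), PySem.Int.ofStr? (p.getD 1 "") with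
    | some lo, some hi => (PySem.List.pyRange lo (hi + 1) 1).map PySem.Int.toStr
    | _, _ => []     -- int() raises in Python; under Pre_ this is only reached where discarded
  else [y]

def etss_range_alt (etssrange : String) : List String :=
  match (PySem.Str.split? etssrange ".").getD [] with
  | [] => []         -- unreachable: split with a non-empty separator never returns []
  | b0 :: rest =>
    rest.foldl
      (fun combos y => combos.flatMap (fun c => (expandBlock y).map (fun o => c ++ "." ++ o)))
      (expandBlock b0)

-- ===== PRECONDITION & SPEC =====
-- helpers for Pre_ only (they do not mention either port)
def pvRange? (y : String) : Option (Int × Int) :=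
  match PySem.Int.ofStr? (((PySem.Str.split? y "-").getD []).getD 0 ""),
        PySem.Int.ofStr? (((PySem.Str.split? y "-").getD []).getD 1 "") with
  | some lo, some hi => some (lo, hi)
  | _, _ => none
-- a dash-block that is not a well-parsed non-empty range (A's recursion stops at the first such)
def pvBadBlock (y : String) : Bool :=
  PySem.Str.isIn "-" y &&
    !(match pvRange? y with | some (lo, hi) => decide (lo ≤ hi) | none => false)
-- Pre_ excludes exactly the inputs on which A raises ValueError: those whose first dash-block
-- that is not a well-parsed non-empty range fails int-parsing (A's recursion reaches that block
-- and int() raises there); on every other input A returns normally.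
def Pre_etss_range (etssrange : String) : Prop :=
  (((PySem.Str.split? etssrange ".").getD []).find? pvBadBlock).all
    (fun y => (pvRange? y).isSome) = true
instance (etssrange : String) : Decidable (Pre_etss_range etssrange) := by
  unfold Pre_etss_range; infer_instance

def pvWitness_etss_range : String := "10.0.1-3.5-6"

def Spec_etss_range (etssrange : String) (out : List String) : Prop := out = etss_range_alt etssrange
instance (etssrange : String) (out : List String) : Decidable (Spec_etss_range etssrange out) := by
  unfold Spec_etss_range; infer_instance

-- ===== CLAIM (what is proved, stated in full; the proofs are below) =====
def Claim_equal_etss_range : Prop := ∀ (etssrange : String), Dom_etss_range etssrange → Pre_etss_range etssrange → Spec_etss_range etssrange (etss_range etssrange)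

-- ===== LEMMAS AND PROOFS =====

-- ---- generic splitOn facts ----
theorem pvModifyHeadId (L : List (List Char)) : L.modifyHead (fun x => x) = L := by
  cases L <;> simp

theorem pvGoChar (c : Char) : ∀ (l : List Char) (fuel : Nat) (cur : List Char) (acc : List (List Char)), l.length < fuel →
    PySem.Chars.splitOn.go [c] fuel l cur acc = acc.reverse ++ (List.splitOn c l).modifyHead (cur.reverse ++ ·) := by
  intro l
  induction l with
  | nil =>
    intro fuel cur acc h
    cases fuel with
    | zero => omega
    | succ f =>
      rw [PySem.Chars.splitOn.go]
      · simp [List.splitOn]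
      · omega
  | cons c' rest ih =>
    intro fuel cur acc h
    cases fuel with
    | zero => omega
    | succ f =>
      rw [PySem.Chars.splitOn.go]
      by_cases hc : c = c'
      · subst hc
        simp only [List.isPrefixOf, BEq.rfl, Bool.true_and, if_true]
        have hd : List.drop [c].length (c :: rest) = rest := by simp
        rw [hd, ih _ [] _ (by simpa using Nat.lt_of_succ_lt_succ h)]
        simp [List.splitOn, List.splitOnP_cons, pvModifyHeadId]
      · have hpre : [c].isPrefixOf (c' :: rest) = false := by
          simp [List.isPrefixOf, hc]
        rw [hpre]
        simp only [if_false, Bool.false_eq_true]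
        rw [ih _ (c' :: cur) _ (by simpa using Nat.lt_of_succ_lt_succ h)]
        simp only [List.splitOn, List.splitOnP_cons, beq_iff_eq]
        rw [if_neg (by simpa [eq_comm] using hc)]
        rw [List.modifyHead_modifyHead]
        have : ((fun x => cur.reverse ++ x) ∘ List.cons c') = (fun x => (c' :: cur).reverse ++ x) := by
          funext x; simp
        rw [this]

theorem pvSplitOnChar (s : List Char) (c : Char) :
    PySem.Chars.splitOn s [c] = List.splitOn c s := by
  rw [PySem.Chars.splitOn, pvGoChar c s _ [] [] (by omega)]
  simp [pvModifyHeadId]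

theorem pvMemSplitOnP (p : Char → Bool) : ∀ (xs l : List Char), l ∈ List.splitOnP p xs → ∀ a ∈ l, ¬ p a := by
  intro xs
  induction xs with
  | nil => intro l h a ha; simp [List.splitOnP_nil] at h; subst h; simp at ha
  | cons x xs ih =>
    intro l h a ha hp
    rw [List.splitOnP_cons] at h
    by_cases hx : p x
    · rw [if_pos hx] at h
      rcases List.mem_cons.mp h with h1 | h1
      · subst h1; simp at ha
      · exact ih l h1 a ha hp
    · rw [if_neg hx] at h
      rcases hrec : List.splitOnP p xs with - | ⟨hd, tl⟩
      · exact List.splitOnP_ne_nil p xs hrec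
      · rw [hrec] at h
        simp only [List.modifyHead] at h
        rcases List.mem_cons.mp h with h1 | h1
        · subst h1
          rcases List.mem_cons.mp ha with h2 | h2
          · subst h2; exact hx hp
          · exact ih hd (hrec ▸ List.mem_cons_self) a h2 hp
        · exact ih l (hrec ▸ List.mem_cons_of_mem hd h1) a ha hp

-- ---- int-string facts ----
theorem pvOfCharsNonneg (cs : List Char) (n : Int) (hm : '-' ∉ cs)
    (h : PySem.Int.ofChars? cs = some n) : 0 ≤ n := by
  unfold PySem.Int.ofChars? at h
  simp only [] at h
  split at h
  · exfalso
    apply hm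
    rename_i ds heq
    have : '-' ∈ (List.dropWhile PySem.Int.isIntSpace (List.dropWhile PySem.Int.isIntSpace cs).reverse).reverse := by
      rw [heq]; simp
    have h2 := List.mem_reverse.mp this
    have h3 := (List.dropWhile_sublist _).mem h2
    have h4 := List.mem_reverse.mp h3
    exact (List.dropWhile_sublist _).mem h4
  · simp only [Option.map_eq_some_iff] at h
    obtain ⟨a, ha, h2⟩ := h
    simp only [bind, Option.bind_eq_some_iff] at ha
    obtain ⟨b, hb1, hb2⟩ := ha
    simp only [pure, Option.some_inj] at hb2
    subst hb2; subst h2; positivity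
  · simp only [Option.map_eq_some_iff] at h
    obtain ⟨a, ha, h2⟩ := h
    simp only [bind, Option.bind_eq_some_iff] at ha
    obtain ⟨b, hb1, hb2⟩ := ha
    simp only [pure, Option.some_inj] at hb2
    subst hb2; subst h2; positivity

theorem pvDigitCharIsDigit (m : Nat) (h : m < 10) : (Nat.digitChar m).isDigit = true := by
  interval_cases m <;> decide

theorem pvToDigitsCoreMem (f : Nat) : ∀ (n : Nat) (acc : List Char) (c : Char),
    c ∈ Nat.toDigitsCore 10 f n acc → c ∈ acc ∨ c.isDigit = true := by
  induction f with
  | zero => intro n acc c h; exact Or.inl (by simpa [Nat.toDigitsCore] using h)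
  | succ f ih =>
    intro n acc c h
    rw [Nat.toDigitsCore] at h
    by_cases hz : n / 10 = 0
    · rw [if_pos hz] at h
      rcases List.mem_cons.mp h with h1 | h1
      · exact Or.inr (h1 ▸ pvDigitCharIsDigit _ (Nat.mod_lt _ (by norm_num)))
      · exact Or.inl h1
    · rw [if_neg hz] at h
      rcases ih _ _ _ h with h1 | h1
      · rcases List.mem_cons.mp h1 with h2 | h2
        · exact Or.inr (h2 ▸ pvDigitCharIsDigit _ (Nat.mod_lt _ (by norm_num)))
        · exact Or.inl h2
      · exact Or.inr h1

theorem pvToCharsDigits (z : Int) (hz : 0 ≤ z) (c : Char) (h : c ∈ PySem.Int.toChars z) :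
    c.isDigit = true := by
  unfold PySem.Int.toChars at h
  rw [if_neg (by omega)] at h
  rcases pvToDigitsCoreMem _ _ _ _ h with h1 | h1
  · simp at h1
  · exact h1


-- ---- port-shape abbreviations and equation lemmas ----
def pvDash (y : String) : Bool := PySem.Str.isIn "-" y

def pvBlocks (s : String) : List String := (PySem.Str.split? s ".").getD []

def pvStep (combos : List String) (y : String) : List String :=
  combos.flatMap (fun c => (expandBlock y).map (fun o => c ++ "." ++ o))

def pvProd : List String → List String
  | [] => []
  | b0 :: rest => rest.foldl pvStep (expandBlock b0)

theorem pvAltEq (s : String) : etss_range_alt s = pvProd (pvBlocks s) := by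
  unfold etss_range_alt pvProd pvBlocks pvStep
  cases (PySem.Str.split? s ".").getD [] <;> rfl

theorem etssALoop_nil (recur : String → List String) (s : String) (pre : List String) :
    etssALoop recur s pre [] = [s] := rfl

theorem etssALoop_cons_nondash (recur : String → List String) (s y : String)
    (pre rest : List String) (h : PySem.Str.isIn "-" y = false) :
    etssALoop recur s pre (y :: rest) = etssALoop recur s (pre ++ [y]) rest := by
  simp only [etssALoop]
  rw [if_neg (by simpa using h)]

theorem etssALoop_cons_dash (recur : String → List String) (s y : String)
    (pre rest : List String) (lo hi : Int) (h : PySem.Str.isIn "-" y = true)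
    (hlo : PySem.Int.ofStr? (((PySem.Str.split? y "-").getD []).getD 0 "") = some lo)
    (hhi : PySem.Int.ofStr? (((PySem.Str.split? y "-").getD []).getD 1 "") = some hi) :
    etssALoop recur s pre (y :: rest) =
      (PySem.List.pyRange lo (hi + 1) 1).foldl
        (fun hosts z =>
          hosts ++ recur (PySem.Str.join "." (pre ++ [PySem.Int.toStr z] ++ rest))) [] := by
  simp only [etssALoop]
  rw [if_pos h, hlo, hhi]

theorem expandBlock_nondash (y : String) (h : PySem.Str.isIn "-" y = false) :
    expandBlock y = [y] := by
  simp only [expandBlock]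
  rw [if_neg (by simpa using h)]

theorem expandBlock_dash (y : String) (lo hi : Int) (h : PySem.Str.isIn "-" y = true)
    (hlo : PySem.Int.ofStr? (((PySem.Str.split? y "-").getD []).getD 0 "") = some lo)
    (hhi : PySem.Int.ofStr? (((PySem.Str.split? y "-").getD []).getD 1 "") = some hi) :
    expandBlock y = (PySem.List.pyRange lo (hi + 1) 1).map PySem.Int.toStr := by
  simp only [expandBlock]
  rw [if_pos h, hlo, hhi]

theorem pvRange?_some (y : String) (lo hi : Int)
    (hlo : PySem.Int.ofStr? (((PySem.Str.split? y "-").getD []).getD 0 "") = some lo)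
    (hhi : PySem.Int.ofStr? (((PySem.Str.split? y "-").getD []).getD 1 "") = some hi) :
    pvRange? y = some (lo, hi) := by
  simp only [pvRange?]
  rw [hlo, hhi]

-- ---- split/join round trips at the String level ----
theorem pvSplitChar (s : String) (sep : String) (c : Char) (hc : sep.toList = [c]) :
    (PySem.Str.split? s sep).getD [] = (List.splitOn c s.toList).map String.ofList := by
  unfold PySem.Str.split? PySem.Chars.split?
  rw [hc]
  simp [pvSplitOnChar]

theorem pvBlocksEq (s : String) : pvBlocks s = (List.splitOn '.' s.toList).map String.ofList := by
  unfold pvBlocks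
  exact pvSplitChar s "." '.' (by decide)

theorem pvBlocksNe (s : String) : pvBlocks s ≠ [] := by
  rw [pvBlocksEq]
  intro h
  exact List.splitOnP_ne_nil _ s.toList (by simpa using h)

theorem pvBlocksNoDot (s : String) : ∀ y ∈ pvBlocks s, '.' ∉ y.toList := by
  rw [pvBlocksEq]
  intro y hy
  rcases List.mem_map.mp hy with ⟨l, hl, rfl⟩
  rw [String.toList_ofList]
  intro hmem
  exact pvMemSplitOnP _ s.toList l (by simpa [List.splitOn] using hl) '.' hmem (by simp)

theorem pvMapToListOfList (M : List (List Char)) :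
    List.map String.toList (List.map String.ofList M) = M := by
  rw [List.map_map]
  have h : ∀ l : List Char, (String.toList ∘ String.ofList) l = l := fun l => String.toList_ofList
  exact (List.map_congr_left (fun l _ => h l)).trans (List.map_id _)

theorem pvMapOfListToList (L : List String) :
    List.map String.ofList (List.map String.toList L) = L := by
  rw [List.map_map]
  have h : ∀ y : String, (String.ofList ∘ String.toList) y = y := fun y => String.ofList_toList
  exact (List.map_congr_left (fun y _ => h y)).trans (List.map_id _)

theorem pvJoinSplit (s : String) : PySem.Str.join "." (pvBlocks s) = s := by
  rw [pvBlocksEq]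
  unfold PySem.Str.join PySem.Chars.join
  rw [pvMapToListOfList]
  have h2 : ("." : String).toList = ['.'] := by decide
  rw [h2, List.intercalate_splitOn]
  exact String.ofList_toList

theorem pvSplitJoin (L : List String) (hne : L ≠ []) (hnd : ∀ y ∈ L, '.' ∉ y.toList) :
    pvBlocks (PySem.Str.join "." L) = L := by
  rw [pvBlocksEq]
  unfold PySem.Str.join PySem.Chars.join
  have h2 : ("." : String).toList = ['.'] := by decide
  rw [h2, String.toList_ofList]
  rw [List.splitOn_intercalate (List.map String.toList L) '.'
      (by intro l hl
          rcases List.mem_map.mp hl with ⟨y, hy, rfl⟩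
          exact hnd y hy)
      (by simpa using hne)]
  exact pvMapOfListToList L


-- ---- dash and digit-string facts ----
theorem pvDashIff (y : String) : PySem.Str.isIn "-" y = true ↔ '-' ∈ y.toList := by
  rw [PySem.Str.isIn_iff_infix]
  have : ("-" : String).toList = ['-'] := by decide
  rw [this, List.singleton_infix_iff]

theorem pvLoNonneg (y : String) (lo : Int)
    (hlo : PySem.Int.ofStr? (((PySem.Str.split? y "-").getD []).getD 0 "") = some lo) :
    0 ≤ lo := by
  rw [pvSplitChar y "-" '-' (by decide)] at hlo
  rcases hsp : List.splitOn '-' y.toList with - | ⟨l0, t⟩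
  · exact absurd hsp (by simpa [List.splitOn] using List.splitOnP_ne_nil _ y.toList)
  · rw [hsp] at hlo
    simp only [List.map_cons, List.getD_cons_zero] at hlo
    have hnm : '-' ∉ l0 := fun hm =>
      pvMemSplitOnP _ y.toList l0 (by rw [← List.splitOn]; exact hsp ▸ List.mem_cons_self) '-' hm (by simp)
    unfold PySem.Int.ofStr? at hlo
    rw [String.toList_ofList] at hlo
    exact pvOfCharsNonneg l0 lo hnm hlo

theorem pvToStrNoDash (z : Int) (hz : 0 ≤ z) : PySem.Str.isIn "-" (PySem.Int.toStr z) = false := by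
  rw [← Bool.not_eq_true, pvDashIff]
  intro hm
  rw [PySem.Int.toList_toStr] at hm
  have := pvToCharsDigits z hz '-' hm
  simp at this

theorem pvToStrNoDot (z : Int) (hz : 0 ≤ z) : '.' ∉ (PySem.Int.toStr z).toList := by
  intro hm
  rw [PySem.Int.toList_toStr] at hm
  have := pvToCharsDigits z hz '.' hm
  simp at this

-- ---- product-fold algebra ----
theorem pvStepFlatMap {α : Type} (xs : List α) (g : α → List String) (y : String) :
    pvStep (xs.flatMap g) y = xs.flatMap (fun x => pvStep (g x) y) := by
  unfold pvStep
  rw [List.flatMap_assoc]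

theorem pvFoldFlatMap {α : Type} (l : List String) :
    ∀ (xs : List α) (g : α → List String),
      l.foldl pvStep (xs.flatMap g) = xs.flatMap (fun x => l.foldl pvStep (g x)) := by
  induction l with
  | nil => intro xs g; simp
  | cons y l ih =>
    intro xs g
    rw [List.foldl_cons, pvStepFlatMap, ih xs (fun x => pvStep (g x) y)]
    simp

theorem pvFlatMapCongr {α : Type} (xs : List α) (f g : α → List String)
    (h : ∀ x ∈ xs, f x = g x) : xs.flatMap f = xs.flatMap g := by
  simp only [List.flatMap_def]
  rw [List.map_congr_left h]

-- ---- dotted-join as a fold ----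
def pvJoinFold (c : String) (l : List String) : String :=
  l.foldl (fun a m => a ++ "." ++ m) c

theorem pvJoinFoldAppend (l : List String) : ∀ (a s : String),
    pvJoinFold (a ++ s) l = a ++ pvJoinFold s l := by
  induction l with
  | nil => intro a s; rfl
  | cons m l ih =>
    intro a s
    unfold pvJoinFold at *
    rw [List.foldl_cons, List.foldl_cons]
    have h1 : a ++ s ++ "." ++ m = a ++ (s ++ "." ++ m) := by
      rw [String.append_assoc, String.append_assoc, String.append_assoc]
    rw [h1]
    exact ih a (s ++ "." ++ m)

theorem pvJoinConsCons (x y : String) (t : List String) :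
    PySem.Str.join "." (x :: y :: t) = x ++ "." ++ PySem.Str.join "." (y :: t) := by
  unfold PySem.Str.join
  rw [List.map_cons, List.map_cons, PySem.Chars.join_cons_cons]
  apply String.toList_inj.mp
  simp [String.toList_ofList]

theorem pvJoinFoldEq : ∀ (t : List String) (x : String),
    PySem.Str.join "." (x :: t) = pvJoinFold x t := by
  intro t
  induction t with
  | nil =>
    intro x
    unfold PySem.Str.join pvJoinFold
    rw [List.map_cons, List.map_nil, PySem.Chars.join_singleton]
    exact String.ofList_toList
  | cons y t ih =>
    intro x
    rw [pvJoinConsCons, ih y]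
    unfold pvJoinFold
    rw [List.foldl_cons]
    exact (pvJoinFoldAppend t (x ++ ".") y).symm

-- ---- the non-dash prefix collapses to one combo ----
theorem pvStepSingleton (c y : String) (h : PySem.Str.isIn "-" y = false) :
    pvStep [c] y = [c ++ "." ++ y] := by
  unfold pvStep
  rw [expandBlock_nondash y h]
  rfl

theorem pvFoldPre (mid : List String) : ∀ (c : String),
    (∀ y ∈ mid, PySem.Str.isIn "-" y = false) →
    mid.foldl pvStep [c] = [pvJoinFold c mid] := by
  induction mid with
  | nil => intro c _; rfl
  | cons y mid ih =>
    intro c h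
    rw [List.foldl_cons, pvStepSingleton c y (h y List.mem_cons_self)]
    rw [ih (c ++ "." ++ y) (fun z hz => h z (List.mem_cons_of_mem y hz))]
    unfold pvJoinFold
    rw [List.foldl_cons]

-- the initial combo list obtained after consuming a non-dash prefix `pre` and one value `v`
def pvInit (pre : List String) (v : String) : List String :=
  match pre with
  | [] => [v]
  | p :: ps => [pvJoinFold p ps ++ "." ++ v]

theorem pvProdCons (b0 : String) (rest : List String) :
    pvProd (b0 :: rest) = rest.foldl pvStep (expandBlock b0) := rfl

theorem pvProdSplit (pre : List String) (y : String) (suf : List String)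
    (h : ∀ b ∈ pre, PySem.Str.isIn "-" b = false) :
    pvProd (pre ++ y :: suf) = (expandBlock y).flatMap (fun v => suf.foldl pvStep (pvInit pre v)) := by
  cases pre with
  | nil =>
    rw [List.nil_append, pvProdCons]
    have hexp : expandBlock y = (expandBlock y).flatMap (fun v => [v]) := by simp
    conv_lhs => rw [hexp]
    rw [pvFoldFlatMap]
    rfl
  | cons p ps =>
    rw [List.cons_append, pvProdCons]
    rw [expandBlock_nondash p (h p List.mem_cons_self)]
    rw [List.foldl_append]
    rw [pvFoldPre ps p (fun z hz => h z (List.mem_cons_of_mem p hz))]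
    rw [List.foldl_cons]
    have hstep : pvStep [pvJoinFold p ps] y
        = (expandBlock y).flatMap (fun v => [pvJoinFold p ps ++ "." ++ v]) := by
      unfold pvStep
      rw [List.flatMap_cons, List.flatMap_nil, List.append_nil]
      exact List.map_eq_flatMap
    rw [hstep, pvFoldFlatMap]
    rfl


-- ---- find? plumbing for Pre_ ----
theorem pvBadBlockNondash (y : String) (h : PySem.Str.isIn "-" y = false) :
    pvBadBlock y = false := by
  unfold pvBadBlock
  rw [h]
  rfl

theorem pvFindCons (y : String) (rest : List String) (h : pvBadBlock y = false) :
    (y :: rest).find? pvBadBlock = rest.find? pvBadBlock := by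
  rw [List.find?_cons_of_neg (by simp [h])]

theorem pvFindPre (pre : List String) (h : ∀ b ∈ pre, PySem.Str.isIn "-" b = false)
    (M : List String) : (pre ++ M).find? pvBadBlock = M.find? pvBadBlock := by
  induction pre with
  | nil => rfl
  | cons p ps ih =>
    rw [List.cons_append, pvFindCons p _ (pvBadBlockNondash p (h p List.mem_cons_self))]
    exact ih (fun b hb => h b (List.mem_cons_of_mem p hb))

theorem pvCountPre (pre : List String) (h : ∀ b ∈ pre, PySem.Str.isIn "-" b = false)
    (M : List String) : (pre ++ M).countP pvDash = M.countP pvDash := by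
  induction pre with
  | nil => rfl
  | cons p ps ih =>
    rw [List.cons_append, List.countP_cons_of_neg (by simpa [pvDash] using h p List.mem_cons_self)]
    exact ih (fun b hb => h b (List.mem_cons_of_mem p hb))

-- ---- the scan of A's for-loop equals B's product, by induction on the remaining blocks ----
theorem pvScan (f : Nat)
    (IH : ∀ s : String, Pre_etss_range s → (pvBlocks s).countP pvDash < f →
      etssAFuel f s = pvProd (pvBlocks s)) :
    ∀ (rest pre : List String),
      (∀ b ∈ pre, PySem.Str.isIn "-" b = false) →
      pre ++ rest ≠ [] →
      (∀ b ∈ pre ++ rest, '.' ∉ b.toList) →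
      ((rest.find? pvBadBlock).all (fun y => (pvRange? y).isSome)) = true →
      rest.countP pvDash ≤ f →
      etssALoop (etssAFuel f) (PySem.Str.join "." (pre ++ rest)) pre rest = pvProd (pre ++ rest) := by
  intro rest
  induction rest with
  | nil =>
    intro pre hpre hne _ _ _
    rw [etssALoop_nil, List.append_nil]
    rw [List.append_nil] at hne
    cases pre with
    | nil => exact absurd rfl hne
    | cons p ps =>
      rw [pvProdCons, expandBlock_nondash p (hpre p List.mem_cons_self),
          pvFoldPre ps p (fun z hz => hpre z (List.mem_cons_of_mem p hz)),
          pvJoinFoldEq]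
  | cons y rest' ih =>
    intro pre hpre hne hnd hfind hcount
    by_cases hdash : PySem.Str.isIn "-" y = true
    · -- the first dash-block: A recurses over the parsed range, B expands it in place
      have hsome : ∃ lo hi,
          PySem.Int.ofStr? (((PySem.Str.split? y "-").getD []).getD 0 "") = some lo ∧
          PySem.Int.ofStr? (((PySem.Str.split? y "-").getD []).getD 1 "") = some hi := by
        rcases hlo : PySem.Int.ofStr? (((PySem.Str.split? y "-").getD []).getD 0 "") with - | lo
        · exfalso
          have hbad : pvBadBlock y = true := by
            unfold pvBadBlock pvRange?
            rw [hdash, hlo]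
            rfl
          rw [List.find?_cons_of_pos (by simp [hbad])] at hfind
          simp only [Option.all_some] at hfind
          unfold pvRange? at hfind
          rw [hlo] at hfind
          simp at hfind
        · rcases hhi : PySem.Int.ofStr? (((PySem.Str.split? y "-").getD []).getD 1 "") with - | hi
          · exfalso
            have hbad : pvBadBlock y = true := by
              unfold pvBadBlock pvRange?
              rw [hlo, hhi, hdash]
              rfl
            rw [List.find?_cons_of_pos (by simp [hbad])] at hfind
            simp only [Option.all_some] at hfind
            unfold pvRange? at hfind
            rw [hlo, hhi] at hfind
            simp at hfind
          · exact ⟨lo, hi, rfl, rfl⟩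
      obtain ⟨lo, hi, hlo, hhi⟩ := hsome
      have hlo0 : 0 ≤ lo := pvLoNonneg y lo hlo
      rw [etssALoop_cons_dash _ _ _ _ _ lo hi hdash hlo hhi]
      rw [PySem.List.foldl_append_eq_flatMap, List.nil_append]
      rw [pvProdSplit pre y rest' hpre, expandBlock_dash y lo hi hdash hlo hhi]
      rw [List.flatMap_map]
      apply pvFlatMapCongr
      intro z hz
      have hzmem := (PySem.List.mem_pyRange_one).mp hz
      have hz0 : 0 ≤ z := le_trans hlo0 hzmem.1
      have hrng : lo ≤ hi := by omega
      -- y is a good non-empty range, so Pre_ passes to the tail blocks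
      have hgood : pvBadBlock y = false := by
        unfold pvBadBlock
        rw [pvRange?_some y lo hi hlo hhi, hdash]
        simp [hrng]
      have hfind' : ((rest'.find? pvBadBlock).all (fun b => (pvRange? b).isSome)) = true := by
        rw [pvFindCons y rest' hgood] at hfind
        exact hfind
      have hndz : ∀ b ∈ pre ++ PySem.Int.toStr z :: rest', '.' ∉ b.toList := by
        intro b hb
        rcases List.mem_append.mp hb with h1 | h1
        · exact hnd b (List.mem_append.mpr (Or.inl h1))
        · rcases List.mem_cons.mp h1 with h2 | h2
          · exact h2 ▸ pvToStrNoDot z hz0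
          · exact hnd b (List.mem_append.mpr (Or.inr (List.mem_cons_of_mem y h2)))
      have hblocks : pvBlocks (PySem.Str.join "." (pre ++ PySem.Int.toStr z :: rest'))
          = pre ++ PySem.Int.toStr z :: rest' := by
        exact pvSplitJoin _ (by simp) hndz
      have hprez : Pre_etss_range (PySem.Str.join "." (pre ++ PySem.Int.toStr z :: rest')) := by
        unfold Pre_etss_range
        show ((pvBlocks _).find? pvBadBlock).all _ = true
        rw [hblocks, pvFindPre pre hpre,
            pvFindCons _ rest' (pvBadBlockNondash _ (pvToStrNoDash z hz0))]
        exact hfind'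
      have hcountz : (pvBlocks (PySem.Str.join "." (pre ++ PySem.Int.toStr z :: rest'))).countP pvDash < f := by
        rw [hblocks, pvCountPre pre hpre,
            List.countP_cons_of_neg (by simpa [pvDash] using pvToStrNoDash z hz0)]
        have : (y :: rest').countP pvDash = rest'.countP pvDash + 1 := by
          rw [List.countP_cons_of_pos (by simpa [pvDash] using hdash)]
        omega
      have hIH := IH _ hprez hcountz
      rw [hblocks] at hIH
      have h1 : pre ++ [PySem.Int.toStr z] ++ rest' = pre ++ PySem.Int.toStr z :: rest' := by simp
      rw [h1, hIH]
      rw [pvProdSplit pre (PySem.Int.toStr z) rest' hpre,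
          expandBlock_nondash _ (pvToStrNoDash z hz0)]
      simp
    · -- a non-dash block: A's loop steps over it, B's product keeps it as a singleton
      have hdash' : PySem.Str.isIn "-" y = false := by simpa using hdash
      rw [etssALoop_cons_nondash _ _ _ _ _ hdash']
      have hsplit : pre ++ y :: rest' = (pre ++ [y]) ++ rest' := by simp
      rw [hsplit]
      refine ih (pre ++ [y]) ?_ (by simp) (by rw [← hsplit]; exact hnd) ?_ ?_
      · intro b hb
        rcases List.mem_append.mp hb with h1 | h1
        · exact hpre b h1
        · rcases List.mem_cons.mp h1 with h2 | h2
          · exact h2 ▸ hdash'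
          · simp at h2
      · rw [pvFindCons y rest' (pvBadBlockNondash y hdash')] at hfind
        exact hfind
      · rw [List.countP_cons_of_neg (by simpa [pvDash] using hdash')] at hcount
        exact hcount

theorem pvMain : ∀ (f : Nat) (s : String), Pre_etss_range s → (pvBlocks s).countP pvDash < f →
    etssAFuel f s = pvProd (pvBlocks s) := by
  intro f
  induction f with
  | zero => intro s _ h; omega
  | succ f ihf =>
    intro s hpre hcount
    have hfind : ((pvBlocks s).find? pvBadBlock).all (fun y => (pvRange? y).isSome) = true := hpre
    have h0 := pvScan f ihf (pvBlocks s) [] (by simp) (by simpa using pvBlocksNe s)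
      (by simpa using pvBlocksNoDot s) hfind (by omega)
    rw [List.nil_append, pvJoinSplit s] at h0
    exact h0

-- ===== VERDICT (by name: the statement is the Claim_ definition above) =====
theorem etss_range_spec : Claim_equal_etss_range := by
  intro s _ hpre
  unfold Spec_etss_range
  rw [pvAltEq]
  exact pvMain _ s hpre (Nat.lt_succ_self _)
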